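-- pv_equiv track=rewrite | github.com/RabeeWorld/speech-analysis | src/repetition_detection.py | detect_text_pattern
-- ===== SOURCE A (Python) =====
-- def detect_text_pattern(text):
--     words = text.split()
--
--     if not words:
--         return None, 0
--
--     i = 0
--
--     while i < len(words) - 1:
--         count = 1
--
--         # count consecutive repeats
--         while i + 1 < len(words) and words[i] == words[i + 1]:
--             count += 1
--             i += 1
--
--         if count > 1:
--             # build pattern like ba-ba-ball
--             if i + 1 < len(words):
--                 pattern_list = [words[i]] * count + [words[i + 1]]
--             else:
--                 pattern_list = [words[i]] * count
--
--             pattern = "-".join(pattern_list)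
--
--             return pattern, count - 1
--
--         i += 1
--
--     return None, 0
-- ===== SOURCE B (Python) =====
-- def detect_text_pattern(text):
--     words = text.split()
--     # compress into consecutive runs [word, length]
--     runs = []
--     for w in words:
--         if runs and runs[-1][0] == w:
--             runs[-1][1] += 1
--         else:
--             runs.append([w, 1])
--     # first run longer than 1 wins; append the next run's word if any
--     for j, (w, n) in enumerate(runs):
--         if n > 1:
--             parts = [w] * n
--             if j + 1 < len(runs):
--                 parts.append(runs[j + 1][0])
--             return "-".join(parts), n - 1
--     return None, 0
-- ===== Notes on version B (the rewrite author's own statement) =====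
-- stated objective: alternative
-- what changed: A's nested index-based while loops are replaced by a run-length-encoding decomposition: one pass compresses the words into (word, run-length) runs, then a scan of the runs finds the first run longer than 1 and appends the next run's word.
import Mathlib
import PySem

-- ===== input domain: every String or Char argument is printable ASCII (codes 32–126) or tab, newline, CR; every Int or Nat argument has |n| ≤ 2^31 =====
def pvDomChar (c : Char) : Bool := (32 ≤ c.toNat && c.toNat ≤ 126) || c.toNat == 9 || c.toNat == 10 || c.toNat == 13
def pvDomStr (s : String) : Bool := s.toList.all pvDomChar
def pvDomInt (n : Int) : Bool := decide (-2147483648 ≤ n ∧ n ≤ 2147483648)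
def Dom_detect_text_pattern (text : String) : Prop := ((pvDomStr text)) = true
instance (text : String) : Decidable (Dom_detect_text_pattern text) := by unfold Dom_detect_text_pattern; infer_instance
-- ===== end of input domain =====

-- B replaces A's nested index-based while loops by a different decomposition: compress the words
-- into (word, run-length) runs in one pass, then scan the runs (same cost, alternative structure).

-- ===== PORT A =====
-- inner while loop of A: advance i while words[i] == words[i+1], counting (accesses are in-range-guarded, so getD is exact)
def pvRunEnd (words : List String) (i : Nat) (count : Nat) : Nat × Nat :=
  if h : i + 1 < words.length ∧ words.getD i "" = words.getD (i + 1) "" then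
    pvRunEnd words (i + 1) (count + 1)
  else (i, count)
termination_by words.length - i
decreasing_by have := h.1; omega

-- cited by pvOuter's decreasing_by
theorem pvRunEnd_ge (words : List String) (i count : Nat) : i ≤ (pvRunEnd words i count).1 := by
  fun_induction pvRunEnd words i count with
  | case1 i c h ih => omega
  | case2 i c h => exact Nat.le_refl i

-- outer while loop of A
def pvOuter (words : List String) (i : Nat) : Option String × Int :=
  if hlt : i < words.length - 1 then
    let r := pvRunEnd words i 1
    if r.2 > 1 then
      let pl :=
        if r.1 + 1 < words.length then
          List.replicate r.2 (words.getD r.1 "") ++ [words.getD (r.1 + 1) ""]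
        else
          List.replicate r.2 (words.getD r.1 "")
      (some (PySem.Str.join "-" pl), (r.2 : Int) - 1)
    else
      pvOuter words (r.1 + 1)
  else (none, 0)
termination_by words.length - i
decreasing_by have := pvRunEnd_ge words i 1; omega

def detect_text_pattern (text : String) : Option String × Int :=
  let words := PySem.Str.split₀ text
  if words.isEmpty then (none, 0) else pvOuter words 0

-- ===== PORT B =====
-- one step of Source B's run-building loop (mutating runs[-1] becomes dropLast ++ [updated])
def pvRunsStep (runs : List (String × Nat)) (w : String) : List (String × Nat) :=
  match runs.getLast? with
  | some (w0, n) => if w0 = w then runs.dropLast ++ [(w0, n + 1)] else runs ++ [(w, 1)]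
  | none => [(w, 1)]

def pvRuns (words : List String) : List (String × Nat) := words.foldl pvRunsStep []

-- Source B's scan over the runs for the first run longer than 1
def pvScan : List (String × Nat) → Option String × Int
  | [] => (none, 0)
  | (w, n) :: rest =>
    if n > 1 then
      let parts := List.replicate n w ++ (match rest with | (w2, _) :: _ => [w2] | [] => [])
      (some (PySem.Str.join "-" parts), (n : Int) - 1)
    else pvScan rest

def detect_text_pattern_alt (text : String) : Option String × Int :=
  pvScan (pvRuns (PySem.Str.split₀ text))

-- ===== PRECONDITION & SPEC =====
def Spec_detect_text_pattern (text : String) (out : Option String × Int) : Prop := out = detect_text_pattern_alt text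
instance (text : String) (out : Option String × Int) : Decidable (Spec_detect_text_pattern text out) := by unfold Spec_detect_text_pattern; infer_instance

-- ===== CLAIM (what is proved, stated in full; the proofs are below) =====
def Claim_equal_detect_text_pattern : Prop := ∀ (text : String), Dom_detect_text_pattern text → Spec_detect_text_pattern text (detect_text_pattern text)

-- ===== LEMMAS AND PROOFS =====

-- structural (cons-side) version of Source B's run building, and the length of the leading run
def pvExtend : String → Nat → List String → List (String × Nat)
  | w0, n, [] => [(w0, n)]
  | w0, n, w :: t => if w0 = w then pvExtend w0 (n + 1) t else (w0, n) :: pvExtend w 1 t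

def runsOf : List String → List (String × Nat)
  | [] => []
  | a :: t => pvExtend a 1 t

def leadLen (a : String) (ws : List String) : Nat := (ws.takeWhile (fun w => a == w)).length

theorem leadLen_cons_eq (a : String) (t : List String) : leadLen a (a :: t) = 1 + leadLen a t := by
  simp [leadLen, List.takeWhile, Nat.add_comm]

theorem leadLen_cons_ne (a b : String) (t : List String) (h : a ≠ b) : leadLen a (b :: t) = 0 := by
  simp only [leadLen, List.takeWhile]
  rw [show (a == b) = false from beq_eq_false_iff_ne.mpr h]
  rfl

theorem foldl_pvRunsStep (ws : List String) : ∀ (pre : List (String × Nat)) (w0 : String) (n : Nat),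
    List.foldl pvRunsStep (pre ++ [(w0, n)]) ws = pre ++ pvExtend w0 n ws := by
  induction ws with
  | nil => intro pre w0 n; simp [pvExtend]
  | cons w t ih =>
    intro pre w0 n
    simp only [List.foldl_cons, pvRunsStep, List.getLast?_concat, List.dropLast_concat, pvExtend]
    by_cases hw : w0 = w
    · simp only [if_pos hw, ih]
    · simp only [if_neg hw]
      rw [ih ((pre ++ [(w0, n)])) w 1]
      simp

theorem pvRuns_cons (a : String) (t : List String) : pvRuns (a :: t) = pvExtend a 1 t := by
  have := foldl_pvRunsStep t [] a 1
  simpa [pvRuns, pvRunsStep] using this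

theorem pvExtend_eq (ws : List String) : ∀ (w0 : String) (n : Nat),
    pvExtend w0 n ws = (w0, n + leadLen w0 ws) :: runsOf (ws.drop (leadLen w0 ws)) := by
  induction ws with
  | nil => intro w0 n; simp [pvExtend, leadLen, runsOf]
  | cons w t ih =>
    intro w0 n
    by_cases hw : w0 = w
    · have hlead : leadLen w0 (w :: t) = 1 + leadLen w0 t := by
        simp [leadLen, List.takeWhile, hw, Nat.add_comm]
      rw [hlead]
      simp only [pvExtend, if_pos hw, ih w0 (n + 1)]
      have : n + 1 + leadLen w0 t = n + (1 + leadLen w0 t) := by omega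
      rw [this]
      rw [Nat.add_comm 1 (leadLen w0 t), List.drop_succ_cons]
    · have hlead : leadLen w0 (w :: t) = 0 := leadLen_cons_ne w0 w t hw
      rw [hlead]
      simp [pvExtend, if_neg hw, runsOf]

theorem drop_getD (ws : List String) (i : Nat) (a : String) (rest : List String)
    (h : ws.drop i = a :: rest) : ws.getD i "" = a := by
  have h0 : (ws.drop i)[0]? = some a := by rw [h]; rfl
  rw [List.getElem?_drop] at h0
  simp only [Nat.add_zero] at h0
  simp [List.getD_eq_getElem?_getD, h0]

theorem drop_succ_of_drop (ws : List String) (i : Nat) (a : String) (rest : List String)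
    (h : ws.drop i = a :: rest) : ws.drop (i + 1) = rest := by
  have : ws.drop (i + 1) = (ws.drop i).drop 1 := by rw [List.drop_drop]
  rw [this, h]; rfl

theorem length_of_drop (ws : List String) (i : Nat) (a : String) (rest : List String)
    (h : ws.drop i = a :: rest) : ws.length = i + 1 + rest.length := by
  have := congrArg List.length h
  simp [List.length_drop] at this
  omega

theorem pvRunEnd_spec (rest : List String) : ∀ (ws : List String) (i c : Nat) (a : String),
    ws.drop i = a :: rest → pvRunEnd ws i c = (i + leadLen a rest, c + leadLen a rest) := by
  induction rest with
  | nil =>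
    intro ws i c a h
    have hlen := length_of_drop ws i a [] h
    rw [pvRunEnd]
    rw [dif_neg (by simp at hlen ⊢; omega)]
    simp [leadLen]
  | cons b r' ih =>
    intro ws i c a h
    have hlen := length_of_drop ws i a (b :: r') h
    have hga := drop_getD ws i a _ h
    have hd1 : ws.drop (i + 1) = b :: r' := drop_succ_of_drop ws i a _ h
    have hgb : ws.getD (i + 1) "" = b := drop_getD ws (i + 1) b _ hd1
    by_cases hab : a = b
    · rw [pvRunEnd, dif_pos ⟨by simp at hlen ⊢; omega, by rw [hga, hgb, hab]⟩]
      subst hab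
      rw [ih ws (i + 1) (c + 1) a hd1, leadLen_cons_eq]
      simp only [Prod.mk.injEq]
      omega
    · rw [pvRunEnd, dif_neg (by rw [hga, hgb]; tauto)]
      rw [leadLen_cons_ne a b r' hab]
      simp

theorem runGeom (rest : List String) : ∀ (ws : List String) (i : Nat) (a : String),
    ws.drop i = a :: rest →
      ws.getD (i + leadLen a rest) "" = a ∧
      ws.drop (i + leadLen a rest + 1) = rest.drop (leadLen a rest) ∧
      (i + leadLen a rest + 1 < ws.length ↔ rest.drop (leadLen a rest) ≠ []) := by
  induction rest with
  | nil =>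
    intro ws i a h
    have hlen := length_of_drop ws i a [] h
    simp only [List.length_nil] at hlen
    refine ⟨by simpa [leadLen] using drop_getD ws i a [] h, ?_, ?_⟩
    · simp [leadLen, drop_succ_of_drop ws i a [] h]
    · simp [leadLen]; omega
  | cons b r' ih =>
    intro ws i a h
    have hlen := length_of_drop ws i a (b :: r') h
    have hd1 : ws.drop (i + 1) = b :: r' := drop_succ_of_drop ws i a _ h
    by_cases hab : a = b
    · subst hab
      have := ih ws (i + 1) a hd1
      rw [leadLen_cons_eq]
      constructor
      · rw [show i + (1 + leadLen a r') = i + 1 + leadLen a r' by omega]; exact this.1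
      constructor
      · rw [show i + (1 + leadLen a r') + 1 = i + 1 + leadLen a r' + 1 by omega]
        rw [this.2.1]
        rw [Nat.add_comm 1 (leadLen a r'), List.drop_succ_cons]
      · rw [show i + (1 + leadLen a r') + 1 = i + 1 + leadLen a r' + 1 by omega]
        rw [Nat.add_comm 1 (leadLen a r'), List.drop_succ_cons]
        exact this.2.2
    · rw [leadLen_cons_ne a b r' hab]
      refine ⟨by simpa using drop_getD ws i a _ h, by simpa using hd1, ?_⟩
      simp only [Nat.add_zero, List.drop_zero, ne_eq]
      simp only [List.length_cons] at hlen
      exact ⟨fun _ => by simp, fun _ => by omega⟩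

theorem pvOuter_eq (ws : List String) : ∀ (i : Nat), pvOuter ws i = pvScan (runsOf (ws.drop i)) := by
  suffices h : ∀ (k i : Nat), ws.length - i ≤ k → pvOuter ws i = pvScan (runsOf (ws.drop i)) by
    intro i; exact h (ws.length - i) i (Nat.le_refl _)
  intro k
  induction k with
  | zero =>
    intro i hk
    rw [pvOuter, dif_neg (by omega)]
    rw [List.drop_eq_nil_of_le (by omega)]
    rfl
  | succ k ih =>
    intro i hk
    by_cases hlt : i < ws.length - 1
    · -- at least two words remain: ws.drop i = a :: b :: rest
      have hlen2 : 2 ≤ (ws.drop i).length := by simp [List.length_drop]; omega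
      rcases hd : ws.drop i with _ | ⟨a, tail⟩
      · rw [hd] at hlen2; simp at hlen2
      rcases htail : tail with _ | ⟨b, rest⟩
      · rw [hd, htail] at hlen2; simp at hlen2
      subst htail
      have hrun := pvRunEnd_spec (b :: rest) ws i 1 a hd
      by_cases hab : a = b
      · -- repeated pair: A returns here
        subst hab
        have hL1 : 1 ≤ leadLen a (a :: rest) := by rw [leadLen_cons_eq]; omega
        have hgeo := runGeom (a :: rest) ws i a hd
        rw [pvOuter, dif_pos hlt, hrun]
        simp only [gt_iff_lt]
        rw [if_pos (show (1:Nat) < 1 + leadLen a (a :: rest) by omega)]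
        rw [runsOf, pvExtend_eq]
        simp only [pvScan, gt_iff_lt]
        rw [if_pos (show (1:Nat) < 1 + leadLen a (a :: rest) by omega)]
        rw [hgeo.1]
        rcases hafter : (a :: rest).drop (leadLen a (a :: rest)) with _ | ⟨c, after'⟩
        · rw [if_neg (show ¬(i + leadLen a (a :: rest) + 1 < ws.length) by
              rw [hgeo.2.2, hafter]; simp)]
          simp [runsOf]
        · rw [if_pos (show i + leadLen a (a :: rest) + 1 < ws.length by
              rw [hgeo.2.2, hafter]; simp)]
          have hc : ws.getD (i + leadLen a (a :: rest) + 1) "" = c :=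
            drop_getD ws _ c after' (by rw [hgeo.2.1, hafter])
          rw [hc, runsOf, pvExtend_eq]
      · -- distinct pair: A advances by one
        rw [pvOuter, dif_pos hlt, hrun]
        rw [leadLen_cons_ne a b rest hab]
        simp only [Nat.add_zero, gt_iff_lt]
        rw [if_neg (by omega)]
        have hd1 : ws.drop (i + 1) = b :: rest := drop_succ_of_drop ws i a _ hd
        rw [ih (i + 1) (by omega), hd1]
        conv_rhs => rw [runsOf, pvExtend_eq, leadLen_cons_ne a b rest hab]
        simp only [Nat.add_zero, List.drop_zero, pvScan, gt_iff_lt]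
        rw [if_neg (by omega)]
    · -- fewer than two words remain: both sides are (none, 0)
      rw [pvOuter, dif_neg hlt]
      have hlen : (ws.drop i).length ≤ 1 := by simp [List.length_drop]; omega
      rcases hd : ws.drop i with _ | ⟨a, tail⟩
      · rfl
      · rw [hd] at hlen
        simp only [List.length_cons] at hlen
        have htail : tail = [] := List.eq_nil_of_length_eq_zero (by omega)
        subst htail
        simp [runsOf, pvExtend, pvScan]

-- ===== VERDICT (by name: the statement is the Claim_ definition above) =====
theorem detect_text_pattern_spec : Claim_equal_detect_text_pattern := by
  intro text _
  unfold Spec_detect_text_pattern detect_text_pattern detect_text_pattern_alt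
  rcases hws : PySem.Str.split₀ text with _ | ⟨a, t⟩
  · simp [pvRuns, pvScan]
  · simp only [List.isEmpty_cons, Bool.false_eq_true, if_false]
    rw [pvOuter_eq (a :: t) 0, List.drop_zero, pvRuns_cons]
    rfl
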